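-- pv_equiv track=rewrite | github.com/JOOCHANN/Programmers_algorithm | level1/Pressing_the_keypad.py | solution
-- ===== SOURCE A (Python) =====
-- def solution(numbers, hand):
--     answer = ''
--     left_area = [1, 4, 7]
--     right_area = [3, 6, 9]
--     center = [2, 5, 8, 0]
--     left_q = [3, 0] # Left start
--     right_q = [3, 2] # Right start
--
--     for n in numbers:
--         if n in left_area:
--             answer += "L"
--             left_q = [n//3, 0]
--         elif n in right_area:
--             answer += "R"
--             right_q = [n//3-1, 2]
--         elif n in center:
--             if n != 0: n_location = [n//3, 1]
--             else : n_location = [3, 1]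
--
--             n_l = abs(n_location[0] - left_q[0]) + abs(n_location[1] - left_q[1])
--             n_r = abs(n_location[0] - right_q[0]) + abs(n_location[1] - right_q[1])
--
--             if (n_l == n_r and hand == "left") or (n_l < n_r):
--                 answer += "L"
--                 left_q = n_location
--             elif (n_l == n_r and hand == "right") or (n_l > n_r):
--                 answer += "R"
--                 right_q = n_location
--
--     return answer
-- ===== SOURCE B (Python) =====
-- # B: table-driven finite automaton.  The machine state is the pair of thumb
-- # coordinates; all pressing logic is executed ONCE, ahead of time, for every
-- # reachable (left, right, digit) triple, producing a transition table; the
-- # main loop is then nothing but dictionary lookups.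
--
-- _POS = [(3, 1), (0, 0), (0, 1), (0, 2), (1, 0), (1, 1), (1, 2), (2, 0), (2, 1), (2, 2)]
-- _LSTATES = [(3, 0), (0, 0), (1, 0), (2, 0), (0, 1), (1, 1), (2, 1), (3, 1)]
-- _RSTATES = [(3, 2), (0, 2), (1, 2), (2, 2), (0, 1), (1, 1), (2, 1), (3, 1)]
--
--
-- def _table(tie_left, tie_right):
--     entries = []
--     for L in _LSTATES:
--         for R in _RSTATES:
--             for n in range(10):
--                 r, c = _POS[n]
--                 if c == 0:
--                     entries.append(((L, R, n), ("L", (r, c), R)))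
--                 elif c == 2:
--                     entries.append(((L, R, n), ("R", L, (r, c))))
--                 else:
--                     dl = abs(r - L[0]) + abs(c - L[1])
--                     dr = abs(r - R[0]) + abs(c - R[1])
--                     if dl < dr or (dl == dr and tie_left):
--                         entries.append(((L, R, n), ("L", (r, c), R)))
--                     elif dr < dl or (dl == dr and tie_right):
--                         entries.append(((L, R, n), ("R", L, (r, c))))
--                     else:
--                         entries.append(((L, R, n), ("", L, R)))
--     return dict(entries)
--
--
-- def solution(numbers, hand):
--     t = _table(hand == "left", hand == "right")
--     state = ((3, 0), (3, 2))
--     out = []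
--     for n in numbers:
--         step = t.get((state[0], state[1], n))
--         if step is not None:
--             ch, L, R = step
--             out.append(ch)
--             state = (L, R)
--     return "".join(out)
-- ===== Notes on version B (the rewrite author's own statement) =====
-- stated objective: alternative
-- what changed: B precomputes a finite-state transition table over every reachable (left-thumb, right-thumb, digit) triple once, turning the keypad simulation into a table-driven automaton whose main loop is nothing but dictionary lookups, instead of A's per-press membership tests and distance computations.
import Mathlib
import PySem

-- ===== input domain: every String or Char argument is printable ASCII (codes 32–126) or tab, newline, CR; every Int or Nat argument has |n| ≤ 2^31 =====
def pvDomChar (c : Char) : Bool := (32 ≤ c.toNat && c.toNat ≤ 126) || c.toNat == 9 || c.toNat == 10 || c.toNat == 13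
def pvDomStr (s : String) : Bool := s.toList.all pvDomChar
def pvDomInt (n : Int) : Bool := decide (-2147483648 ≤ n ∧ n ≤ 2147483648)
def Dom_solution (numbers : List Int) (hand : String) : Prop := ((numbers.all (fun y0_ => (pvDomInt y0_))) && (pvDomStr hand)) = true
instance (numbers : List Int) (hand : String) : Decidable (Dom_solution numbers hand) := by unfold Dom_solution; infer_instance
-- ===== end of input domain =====

-- B replaces A's per-press branching by a precomputed finite-state transition table
-- (built once over every reachable (left, right, digit) triple); the main loop is
-- nothing but dictionary lookups (objective: alternative — a table-driven automaton).

-- ===== PORT A =====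
-- one iteration of A's for-loop; state = (answer, left_q, right_q)
def solutionStepA (hand : String) (st : String × (Int × Int) × (Int × Int)) (n : Int) :
    String × (Int × Int) × (Int × Int) :=
  let answer := st.1
  let left_q := st.2.1
  let right_q := st.2.2
  if n ∈ ([1, 4, 7] : List Int) then
    (answer ++ "L", (PySem.Int.floordiv n 3, 0), right_q)
  else if n ∈ ([3, 6, 9] : List Int) then
    (answer ++ "R", left_q, (PySem.Int.floordiv n 3 - 1, 2))
  else if n ∈ ([2, 5, 8, 0] : List Int) then
    let n_location : Int × Int := if n ≠ 0 then (PySem.Int.floordiv n 3, 1) else (3, 1)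
    let n_l := |n_location.1 - left_q.1| + |n_location.2 - left_q.2|
    let n_r := |n_location.1 - right_q.1| + |n_location.2 - right_q.2|
    if (n_l = n_r ∧ hand = "left") ∨ n_l < n_r then
      (answer ++ "L", n_location, right_q)
    else if (n_l = n_r ∧ hand = "right") ∨ n_l > n_r then
      (answer ++ "R", left_q, n_location)
    else (answer, left_q, right_q)
  else (answer, left_q, right_q)

def solution (numbers : List Int) (hand : String) : String :=
  (numbers.foldl (solutionStepA hand) ("", (3, 0), (3, 2))).1

-- ===== PORT B =====
-- Source B's module constants _POS, _LSTATES, _RSTATES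
def posB : List (Int × Int) := [(3,1),(0,0),(0,1),(0,2),(1,0),(1,1),(1,2),(2,0),(2,1),(2,2)]
def lstatesB : List (Int × Int) := [(3,0),(0,0),(1,0),(2,0),(0,1),(1,1),(2,1),(3,1)]
def rstatesB : List (Int × Int) := [(3,2),(0,2),(1,2),(2,2),(0,1),(1,1),(2,1),(3,1)]

-- _table's `entries` list: three nested for-loops appending one pair per triple
def tableEntries (tl tr : Bool) :
    List (((Int × Int) × (Int × Int) × Int) × (String × (Int × Int) × (Int × Int))) :=
  lstatesB.foldl (fun es L =>
    rstatesB.foldl (fun es R =>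
      (PySem.List.pyRange 0 10 1).foldl (fun es n =>
        let p := PySem.List.pyGetD posB n (0, 0)   -- _POS[n]; n ∈ range(10) is always in range
        let r := p.1
        let c := p.2
        if c = 0 then es ++ [((L, R, n), ("L", (r, c), R))]
        else if c = 2 then es ++ [((L, R, n), ("R", L, (r, c)))]
        else
          let dl := |r - L.1| + |c - L.2|
          let dr := |r - R.1| + |c - R.2|
          if dl < dr ∨ (dl = dr ∧ tl = true) then es ++ [((L, R, n), ("L", (r, c), R))]
          else if dr < dl ∨ (dl = dr ∧ tr = true) then es ++ [((L, R, n), ("R", L, (r, c)))]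
          else es ++ [((L, R, n), ("", L, R))]) es) es) []

-- dict(entries); the generated keys are pairwise distinct, so the raw association
-- list Dict.mk entries is exact here
def tableB (tl tr : Bool) :
    PySem.Dict ((Int × Int) × (Int × Int) × Int) (String × (Int × Int) × (Int × Int)) :=
  PySem.Dict.mk (tableEntries tl tr)

-- one iteration of B's main loop; state = (out, left, right)
def solutionStepB (t : PySem.Dict ((Int × Int) × (Int × Int) × Int) (String × (Int × Int) × (Int × Int)))
    (st : List String × (Int × Int) × (Int × Int)) (n : Int) :
    List String × (Int × Int) × (Int × Int) :=
  match PySem.Dict.get? t (st.2.1, st.2.2, n) with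
  | none => st
  | some s => (st.1 ++ [s.1], s.2.1, s.2.2)

def solution_alt (numbers : List Int) (hand : String) : String :=
  let t := tableB (hand == "left") (hand == "right")
  PySem.Str.join "" (numbers.foldl (solutionStepB t) ([], (3, 0), (3, 2))).1

-- ===== PRECONDITION & SPEC =====
def Spec_solution (numbers : List Int) (hand : String) (out : String) : Prop := out = solution_alt numbers hand
instance (numbers : List Int) (hand : String) (out : String) : Decidable (Spec_solution numbers hand out) := by unfold Spec_solution; infer_instance

-- ===== CLAIM (what is proved, stated in full; the proofs are below) =====
def Claim_equal_solution : Prop := ∀ (numbers : List Int) (hand : String), Dom_solution numbers hand → Spec_solution numbers hand (solution numbers hand)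

-- ===== LEMMAS AND PROOFS =====

theorem intersperse_nil_flatten (l : List (List Char)) :
    (List.intersperse ([] : List Char) l).flatten = l.flatten := by
  induction l with
  | nil => rfl
  | cons a t ih =>
    cases t with
    | nil => rfl
    | cons b u =>
      rw [List.intersperse_cons₂, List.flatten_cons, List.flatten_cons, List.flatten_cons, ih,
        List.flatten_cons, List.nil_append]

theorem join_snoc (out : List String) (s : String) :
    PySem.Str.join "" (out ++ [s]) = PySem.Str.join "" out ++ s := by
  have he : ("" : String).toList = ([] : List Char) := rfl
  simp only [PySem.Str.join, PySem.Chars.join, List.intercalate, List.map_append, List.map_cons,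
    List.map_nil, he]
  rw [intersperse_nil_flatten, intersperse_nil_flatten, List.flatten_append,
    String.ofList_append]
  rw [List.flatten_cons, List.flatten_nil, List.append_nil, String.ofList_toList]

-- abbreviation used only in the proofs: B's state seen through ''.join
def mapJ (st : List String × (Int × Int) × (Int × Int)) : String × (Int × Int) × (Int × Int) :=
  (PySem.Str.join "" st.1, st.2.1, st.2.2)

-- the value stored in the table at (L, R, n)
def entryFn (tl tr : Bool) (L R : Int × Int) (n : Int) : String × (Int × Int) × (Int × Int) :=
  let p := PySem.List.pyGetD posB n (0, 0)
  let r := p.1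
  let c := p.2
  if c = 0 then ("L", (r, c), R)
  else if c = 2 then ("R", L, (r, c))
  else
    let dl := |r - L.1| + |c - L.2|
    let dr := |r - R.1| + |c - R.2|
    if dl < dr ∨ (dl = dr ∧ tl = true) then ("L", (r, c), R)
    else if dr < dl ∨ (dl = dr ∧ tr = true) then ("R", L, (r, c))
    else ("", L, R)

-- one loop body step of _table, as "append one entry"
theorem body_eq (tl tr : Bool) (L R : Int × Int)
    (es : List (((Int × Int) × (Int × Int) × Int) × (String × (Int × Int) × (Int × Int))))
    (n : Int) :
    (let p := PySem.List.pyGetD posB n (0, 0)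
     let r := p.1
     let c := p.2
     if c = 0 then es ++ [((L, R, n), ("L", (r, c), R))]
     else if c = 2 then es ++ [((L, R, n), ("R", L, (r, c)))]
     else
       let dl := |r - L.1| + |c - L.2|
       let dr := |r - R.1| + |c - R.2|
       if dl < dr ∨ (dl = dr ∧ tl = true) then es ++ [((L, R, n), ("L", (r, c), R))]
       else if dr < dl ∨ (dl = dr ∧ tr = true) then es ++ [((L, R, n), ("R", L, (r, c)))]
       else es ++ [((L, R, n), ("", L, R))]) =
      es ++ [((L, R, n), entryFn tl tr L R n)] := by
  simp only [entryFn]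
  split_ifs <;> rfl

-- the entries list, characterised as a flatMap of per-(L,R) blocks
theorem entries_eq (tl tr : Bool) :
    tableEntries tl tr = lstatesB.flatMap (fun L => rstatesB.flatMap (fun R =>
      (PySem.List.pyRange 0 10 1).map (fun n => ((L, R, n), entryFn tl tr L R n)))) := by
  unfold tableEntries
  simp only [body_eq, PySem.List.foldl_append_singleton_eq_map,
    PySem.List.foldl_append_eq_flatMap, List.nil_append]

theorem get?_mk_append {κ ν : Type} [BEq κ] (l1 l2 : List (κ × ν)) (k : κ) :
    (PySem.Dict.mk (l1 ++ l2)).get? k =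
      ((PySem.Dict.mk l1).get? k).or ((PySem.Dict.mk l2).get? k) := by
  induction l1 with
  | nil => simp [PySem.Dict.get?]
  | cons p t ih =>
    obtain ⟨k0, v0⟩ := p
    rw [List.cons_append, PySem.Dict.get?_mk_cons, PySem.Dict.get?_mk_cons]
    cases h : k0 == k with
    | true => simp
    | false => simp [ih]

theorem get?_mk_eq_none {κ ν : Type} [BEq κ] (l : List (κ × ν)) (k : κ)
    (h : ∀ p ∈ l, (p.1 == k) = false) : (PySem.Dict.mk l).get? k = none := by
  induction l with
  | nil => simp [PySem.Dict.get?]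
  | cons p t ih =>
    obtain ⟨k0, v0⟩ := p
    rw [PySem.Dict.get?_mk_cons]
    have h0 : (k0 == k) = false := h (k0, v0) (List.mem_cons_self)
    simp only [h0, if_false, Bool.false_eq_true]
    exact ih (fun q hq => h q (List.mem_cons_of_mem _ hq))

theorem get?_mk_flatMap {α κ ν : Type} [BEq κ] (f : α → List (κ × ν)) (l : List α) (k : κ)
    (v : ν) (a : α) (ha : a ∈ l)
    (hother : ∀ b ∈ l, b ≠ a → ∀ p ∈ f b, (p.1 == k) = false)
    (hself : (PySem.Dict.mk (f a)).get? k = some v) :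
    (PySem.Dict.mk (l.flatMap f)).get? k = some v := by
  induction l with
  | nil => cases ha
  | cons b bs ih =>
    rw [List.flatMap_cons, get?_mk_append]
    by_cases hb : b = a
    · subst hb; rw [hself]; rfl
    · rw [get?_mk_eq_none _ _ (hother b List.mem_cons_self hb), Option.none_or]
      have ha' : a ∈ bs := by
        rcases List.mem_cons.mp ha with h | h
        · exact absurd h.symm hb
        · exact h
      exact ih ha' (fun b' hb' => hother b' (List.mem_cons_of_mem _ hb'))

theorem get?_mk_map {β κ ν : Type} [BEq κ] [LawfulBEq κ] (g : β → κ) (v : β → ν)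
    (l : List β) (n : β) (hn : n ∈ l) (hinj : ∀ m ∈ l, g m = g n → m = n) :
    (PySem.Dict.mk (l.map (fun m => (g m, v m)))).get? (g n) = some (v n) := by
  induction l with
  | nil => cases hn
  | cons m ms ih =>
    rw [List.map_cons, PySem.Dict.get?_mk_cons]
    by_cases h : g m = g n
    · have hm : m = n := hinj m List.mem_cons_self h
      subst hm
      simp
    · have hb : (g m == g n) = false := by simpa using h
      simp only [hb, if_false, Bool.false_eq_true]
      have hn' : n ∈ ms := by
        rcases List.mem_cons.mp hn with h' | h'
        · exact absurd (congrArg g h'.symm) h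
        · exact h'
      exact ih hn' (fun m' hm' => hinj m' (List.mem_cons_of_mem _ hm'))

theorem lookup_some (tl tr : Bool) (L R : Int × Int) (hL : L ∈ lstatesB) (hR : R ∈ rstatesB)
    (n : Int) (hn : n ∈ PySem.List.pyRange 0 10 1) :
    (tableB tl tr).get? (L, R, n) = some (entryFn tl tr L R n) := by
  unfold tableB
  rw [entries_eq]
  apply get?_mk_flatMap _ _ _ _ L hL
  · intro L' hL' hne p hp
    simp only [List.mem_flatMap, List.mem_map] at hp
    obtain ⟨R', hR', n', hn', rfl⟩ := hp
    apply beq_eq_false_iff_ne.mpr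
    intro hcontra
    exact hne (congrArg Prod.fst hcontra)
  · apply get?_mk_flatMap _ _ _ _ R hR
    · intro R' hR' hne p hp
      simp only [List.mem_map] at hp
      obtain ⟨n', hn', rfl⟩ := hp
      apply beq_eq_false_iff_ne.mpr
      intro hcontra
      exact hne (congrArg (fun q => q.2.1) hcontra)
    · exact get?_mk_map (fun m => (L, R, m)) (fun m => entryFn tl tr L R m) _ n hn
        (fun m _ hm => congrArg (fun q => q.2.2) hm)

theorem lookup_none (tl tr : Bool) (L R : Int × Int) (n : Int) (h : ¬(0 ≤ n ∧ n < 10)) :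
    (tableB tl tr).get? (L, R, n) = none := by
  unfold tableB
  rw [entries_eq]
  apply get?_mk_eq_none
  intro p hp
  simp only [List.mem_flatMap, List.mem_map] at hp
  obtain ⟨L', hL', R', hR', n', hn', rfl⟩ := hp
  have hb := (PySem.List.mem_pyRange_one).mp hn'
  apply beq_eq_false_iff_ne.mpr
  intro hcontra
  have : n' = n := congrArg (fun q => q.2.2) hcontra
  omega

-- B's loop body, once the lookup result is known
theorem stepB_some (t : PySem.Dict ((Int × Int) × (Int × Int) × Int) (String × (Int × Int) × (Int × Int)))
    (out : List String) (L R : Int × Int) (n : Int) (v : String × (Int × Int) × (Int × Int))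
    (hget : t.get? (L, R, n) = some v) :
    solutionStepB t (out, L, R) n = (out ++ [v.1], v.2.1, v.2.2) := by
  unfold solutionStepB
  rw [hget]

theorem stepB_none (t : PySem.Dict ((Int × Int) × (Int × Int) × Int) (String × (Int × Int) × (Int × Int)))
    (out : List String) (L R : Int × Int) (n : Int)
    (hget : t.get? (L, R, n) = none) :
    solutionStepB t (out, L, R) n = (out, L, R) := by
  unfold solutionStepB
  rw [hget]

-- left-column digit (1, 4, 7)
theorem caseL (hand : String) (tl tr : Bool) (out : List String) (L R : Int × Int)
    (hR : R ∈ rstatesB) (d : Int) (hd : d ∈ ([1, 4, 7] : List Int))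
    (hE : entryFn tl tr L R d = ("L", (PySem.Int.floordiv d 3, 0), R))
    (hget : (tableB tl tr).get? (L, R, d) = some (entryFn tl tr L R d))
    (hmem : ((PySem.Int.floordiv d 3 : Int), (0 : Int)) ∈ lstatesB) :
    solutionStepA hand (PySem.Str.join "" out, L, R) d =
        mapJ (solutionStepB (tableB tl tr) (out, L, R) d) ∧
      (solutionStepB (tableB tl tr) (out, L, R) d).2.1 ∈ lstatesB ∧
      (solutionStepB (tableB tl tr) (out, L, R) d).2.2 ∈ rstatesB := by
  rw [hE] at hget
  rw [stepB_some _ _ _ _ _ _ hget]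
  refine ⟨?_, hmem, hR⟩
  unfold solutionStepA mapJ
  dsimp only
  rw [if_pos hd, join_snoc]

-- right-column digit (3, 6, 9)
theorem caseR (hand : String) (tl tr : Bool) (out : List String) (L R : Int × Int)
    (hL : L ∈ lstatesB) (d : Int)
    (hd1 : d ∉ ([1, 4, 7] : List Int)) (hd2 : d ∈ ([3, 6, 9] : List Int))
    (hE : entryFn tl tr L R d = ("R", L, (PySem.Int.floordiv d 3 - 1, 2)))
    (hget : (tableB tl tr).get? (L, R, d) = some (entryFn tl tr L R d))
    (hmem : ((PySem.Int.floordiv d 3 - 1 : Int), (2 : Int)) ∈ rstatesB) :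
    solutionStepA hand (PySem.Str.join "" out, L, R) d =
        mapJ (solutionStepB (tableB tl tr) (out, L, R) d) ∧
      (solutionStepB (tableB tl tr) (out, L, R) d).2.1 ∈ lstatesB ∧
      (solutionStepB (tableB tl tr) (out, L, R) d).2.2 ∈ rstatesB := by
  rw [hE] at hget
  rw [stepB_some _ _ _ _ _ _ hget]
  refine ⟨?_, hL, hmem⟩
  unfold solutionStepA mapJ
  dsimp only
  rw [if_neg hd1, if_pos hd2, join_snoc]

-- centre-column digit (2, 5, 8, 0), located at row rd
theorem caseC (hand : String) (tl tr : Bool)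
    (htl : (hand = "left") ↔ (tl = true)) (htr : (hand = "right") ↔ (tr = true))
    (out : List String) (L R : Int × Int) (hL : L ∈ lstatesB) (hR : R ∈ rstatesB)
    (d rd : Int)
    (hd1 : d ∉ ([1, 4, 7] : List Int)) (hd2 : d ∉ ([3, 6, 9] : List Int))
    (hd3 : d ∈ ([2, 5, 8, 0] : List Int))
    (hloc : (if d ≠ 0 then ((PySem.Int.floordiv d 3 : Int), (1 : Int)) else ((3 : Int), (1 : Int))) = (rd, 1))
    (hE : entryFn tl tr L R d =
      (if |rd - L.1| + |1 - L.2| < |rd - R.1| + |1 - R.2| ∨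
          (|rd - L.1| + |1 - L.2| = |rd - R.1| + |1 - R.2| ∧ tl = true) then ("L", (rd, 1), R)
       else if |rd - R.1| + |1 - R.2| < |rd - L.1| + |1 - L.2| ∨
          (|rd - L.1| + |1 - L.2| = |rd - R.1| + |1 - R.2| ∧ tr = true) then ("R", L, (rd, 1))
       else ("", L, R)))
    (hget : (tableB tl tr).get? (L, R, d) = some (entryFn tl tr L R d))
    (hmemL : ((rd : Int), (1 : Int)) ∈ lstatesB) (hmemR : ((rd : Int), (1 : Int)) ∈ rstatesB) :
    solutionStepA hand (PySem.Str.join "" out, L, R) d =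
        mapJ (solutionStepB (tableB tl tr) (out, L, R) d) ∧
      (solutionStepB (tableB tl tr) (out, L, R) d).2.1 ∈ lstatesB ∧
      (solutionStepB (tableB tl tr) (out, L, R) d).2.2 ∈ rstatesB := by
  rw [hE] at hget
  have hA : solutionStepA hand (PySem.Str.join "" out, L, R) d =
      (if (|rd - L.1| + |1 - L.2| = |rd - R.1| + |1 - R.2| ∧ hand = "left") ∨
          |rd - L.1| + |1 - L.2| < |rd - R.1| + |1 - R.2| then
        (PySem.Str.join "" out ++ "L", (rd, 1), R)
       else if (|rd - L.1| + |1 - L.2| = |rd - R.1| + |1 - R.2| ∧ hand = "right") ∨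
          |rd - L.1| + |1 - L.2| > |rd - R.1| + |1 - R.2| then
        (PySem.Str.join "" out ++ "R", L, (rd, 1))
       else (PySem.Str.join "" out, L, R)) := by
    unfold solutionStepA
    dsimp only
    rw [if_neg hd1, if_neg hd2, if_pos hd3, hloc]
  by_cases hcl : |rd - L.1| + |1 - L.2| < |rd - R.1| + |1 - R.2| ∨
      (|rd - L.1| + |1 - L.2| = |rd - R.1| + |1 - R.2| ∧ tl = true)
  · rw [if_pos hcl] at hget
    rw [stepB_some _ _ _ _ _ _ hget]
    refine ⟨?_, hmemL, hR⟩
    rw [hA, if_pos (by tauto)]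
    unfold mapJ
    dsimp only
    rw [join_snoc]
  · by_cases hcr : |rd - R.1| + |1 - R.2| < |rd - L.1| + |1 - L.2| ∨
        (|rd - L.1| + |1 - L.2| = |rd - R.1| + |1 - R.2| ∧ tr = true)
    · rw [if_neg hcl, if_pos hcr] at hget
      rw [stepB_some _ _ _ _ _ _ hget]
      refine ⟨?_, hL, hmemR⟩
      rw [hA, if_neg (by tauto), if_pos (by tauto)]
      unfold mapJ
      dsimp only
      rw [join_snoc]
    · rw [if_neg hcl, if_neg hcr] at hget
      rw [stepB_some _ _ _ _ _ _ hget]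
      refine ⟨?_, hL, hR⟩
      rw [hA, if_neg (by tauto), if_neg (by tauto)]
      unfold mapJ
      dsimp only
      rw [join_snoc, String.append_empty]

theorem step_rel (hand : String) (tl tr : Bool)
    (htl : (hand = "left") ↔ (tl = true)) (htr : (hand = "right") ↔ (tr = true))
    (out : List String) (L R : Int × Int) (n : Int)
    (hL : L ∈ lstatesB) (hR : R ∈ rstatesB) :
    solutionStepA hand (PySem.Str.join "" out, L, R) n =
        mapJ (solutionStepB (tableB tl tr) (out, L, R) n) ∧
      (solutionStepB (tableB tl tr) (out, L, R) n).2.1 ∈ lstatesB ∧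
      (solutionStepB (tableB tl tr) (out, L, R) n).2.2 ∈ rstatesB := by
  by_cases h1 : n = 1
  · subst h1
    exact caseL hand tl tr out L R hR 1 (by decide) rfl
      (lookup_some tl tr L R hL hR 1 (by decide)) (by decide)
  by_cases h4 : n = 4
  · subst h4
    exact caseL hand tl tr out L R hR 4 (by decide) rfl
      (lookup_some tl tr L R hL hR 4 (by decide)) (by decide)
  by_cases h7 : n = 7
  · subst h7
    exact caseL hand tl tr out L R hR 7 (by decide) rfl
      (lookup_some tl tr L R hL hR 7 (by decide)) (by decide)
  by_cases h3 : n = 3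
  · subst h3
    exact caseR hand tl tr out L R hL 3 (by decide) (by decide) rfl
      (lookup_some tl tr L R hL hR 3 (by decide)) (by decide)
  by_cases h6 : n = 6
  · subst h6
    exact caseR hand tl tr out L R hL 6 (by decide) (by decide) rfl
      (lookup_some tl tr L R hL hR 6 (by decide)) (by decide)
  by_cases h9 : n = 9
  · subst h9
    exact caseR hand tl tr out L R hL 9 (by decide) (by decide) rfl
      (lookup_some tl tr L R hL hR 9 (by decide)) (by decide)
  by_cases h2 : n = 2
  · subst h2
    exact caseC hand tl tr htl htr out L R hL hR 2 0 (by decide) (by decide) (by decide)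
      (by decide) rfl (lookup_some tl tr L R hL hR 2 (by decide)) (by decide) (by decide)
  by_cases h5 : n = 5
  · subst h5
    exact caseC hand tl tr htl htr out L R hL hR 5 1 (by decide) (by decide) (by decide)
      (by decide) rfl (lookup_some tl tr L R hL hR 5 (by decide)) (by decide) (by decide)
  by_cases h8 : n = 8
  · subst h8
    exact caseC hand tl tr htl htr out L R hL hR 8 2 (by decide) (by decide) (by decide)
      (by decide) rfl (lookup_some tl tr L R hL hR 8 (by decide)) (by decide) (by decide)
  by_cases h0 : n = 0
  · subst h0
    exact caseC hand tl tr htl htr out L R hL hR 0 3 (by decide) (by decide) (by decide)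
      (by decide) rfl (lookup_some tl tr L R hL hR 0 (by decide)) (by decide) (by decide)
  · have hget : (tableB tl tr).get? (L, R, n) = none :=
      lookup_none tl tr L R n (by omega)
    rw [stepB_none _ _ _ _ _ hget]
    refine ⟨?_, hL, hR⟩
    unfold solutionStepA mapJ
    dsimp only
    rw [if_neg (by simp [h1, h4, h7]), if_neg (by simp [h3, h6, h9]),
      if_neg (by simp [h2, h5, h8, h0])]
theorem fold_rel (numbers : List Int) (hand : String) (tl tr : Bool)
    (htl : (hand = "left") ↔ (tl = true)) (htr : (hand = "right") ↔ (tr = true))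
    (out : List String) (L R : Int × Int) (hL : L ∈ lstatesB) (hR : R ∈ rstatesB) :
    numbers.foldl (solutionStepA hand) (PySem.Str.join "" out, L, R) =
      mapJ (numbers.foldl (solutionStepB (tableB tl tr)) (out, L, R)) := by
  induction numbers generalizing out L R with
  | nil => rfl
  | cons n ns ih =>
    simp only [List.foldl_cons]
    obtain ⟨heq, hL', hR'⟩ := step_rel hand tl tr htl htr out L R n hL hR
    rw [heq]
    rcases h : solutionStepB (tableB tl tr) (out, L, R) n with ⟨out', L', R'⟩
    rw [h] at hL' hR'
    exact ih out' L' R' hL' hR'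

-- ===== VERDICT (by name: the statement is the Claim_ definition above) =====
theorem solution_spec : Claim_equal_solution := by
  intro numbers hand _
  show solution numbers hand = solution_alt numbers hand
  unfold solution solution_alt
  have htl : (hand = "left") ↔ ((hand == "left") = true) := by
    constructor <;> intro h <;> simpa using h
  have htr : (hand = "right") ↔ ((hand == "right") = true) := by
    constructor <;> intro h <;> simpa using h
  conv_lhs => rw [show ("" : String) = PySem.Str.join "" ([] : List String) from rfl]
  rw [fold_rel _ _ _ _ htl htr [] (3, 0) (3, 2) (by decide) (by decide)]
  rfl
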